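-- pv_equiv track=rewrite | github.com/shobana-ma-6973/ppfas-fund-tracker | src/factsheet_parser.py | _is_ppfas_fund_page
-- ===== SOURCE A (Python) =====
-- def _is_ppfas_fund_page(text_lower: str) -> bool:
--     """Check if a page belongs to the PPFAS flagship equity fund (any era)."""
--     fund_names = [
--         "flexi cap",
--         "long term value",
--         "long term equity",
--         "pltvf",
--         "pltef",
--         "ppfcf",
--         "ppfas long term",
--     ]
--     return any(name in text_lower for name in fund_names)
-- ===== SOURCE B (Python) =====
-- _FUND_NAMES = (
--     "flexi cap",
--     "long term value",
--     "long term equity",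
--     "pltvf",
--     "pltef",
--     "ppfcf",
--     "ppfas long term",
-- )
--
--
-- def _is_ppfas_fund_page(text_lower: str) -> bool:
--     """Single left-to-right position scan: at each index test all names at once."""
--     for i in range(len(text_lower)):
--         for name in _FUND_NAMES:
--             if text_lower.startswith(name, i):
--                 return True
--     return False
-- ===== Notes on version B (the rewrite author's own statement) =====
-- stated objective: alternative
-- what changed: Instead of seven sequential full-text substring scans (any(name in text)), B makes a single left-to-right pass over the positions of the text and at each index tests whether any of the seven names starts there.
import Mathlib
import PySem

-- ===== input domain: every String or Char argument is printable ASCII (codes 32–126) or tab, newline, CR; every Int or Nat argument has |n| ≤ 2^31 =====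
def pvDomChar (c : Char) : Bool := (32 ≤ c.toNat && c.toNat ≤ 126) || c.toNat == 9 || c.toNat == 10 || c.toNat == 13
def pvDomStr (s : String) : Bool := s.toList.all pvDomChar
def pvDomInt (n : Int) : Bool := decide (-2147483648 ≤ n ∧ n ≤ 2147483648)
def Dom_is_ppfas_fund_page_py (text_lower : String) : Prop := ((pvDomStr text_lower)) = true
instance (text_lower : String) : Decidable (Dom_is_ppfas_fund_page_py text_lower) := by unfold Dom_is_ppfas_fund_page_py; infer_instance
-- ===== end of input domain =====

-- B replaces seven sequential substring scans with one positional pass testing all names at each index (alternative decomposition, same cost class).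


-- ===== PORT A =====
def pvFundNames : List String :=
  ["flexi cap", "long term value", "long term equity", "pltvf", "pltef", "ppfcf", "ppfas long term"]

-- any(name in text_lower for name in fund_names)
def is_ppfas_fund_page_py (text_lower : String) : Bool :=
  pvFundNames.any (fun name => PySem.Str.isIn name text_lower)

-- ===== PORT B =====
-- the inner 'for name in _FUND_NAMES: if text_lower.startswith(name, i): return True'
def pvAnyNameAt (suffix : List Char) : Bool :=
  pvFundNames.any (fun name => PySem.Chars.startswith suffix name.toList)

-- the outer 'for i in range(len(text_lower))', walking the suffix at each position
def pvScan : List Char → Bool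
  | [] => false
  | c :: rest => pvAnyNameAt (c :: rest) || pvScan rest

def is_ppfas_fund_page_py_alt (text_lower : String) : Bool :=
  pvScan text_lower.toList

-- ===== PRECONDITION & SPEC =====
def Spec_is_ppfas_fund_page_py (text_lower : String) (out : Bool) : Prop := out = is_ppfas_fund_page_py_alt text_lower
instance (text_lower : String) (out : Bool) : Decidable (Spec_is_ppfas_fund_page_py text_lower out) := by unfold Spec_is_ppfas_fund_page_py; infer_instance

-- ===== CLAIM (what is proved, stated in full; the proofs are below) =====
def Claim_equal_is_ppfas_fund_page_py : Prop := ∀ (text_lower : String), Dom_is_ppfas_fund_page_py text_lower → Spec_is_ppfas_fund_page_py text_lower (is_ppfas_fund_page_py text_lower)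

-- ===== LEMMAS AND PROOFS =====

-- pvScan finds exactly the names that occur as an infix (every fund name is nonempty,
-- so the empty suffix, which pvScan never checks, can contain none of them)
theorem pvScan_iff (l : List Char) :
    pvScan l = true ↔ ∃ name ∈ pvFundNames, name.toList <:+: l := by
  induction l with
  | nil =>
    simp only [pvScan]
    constructor
    · intro h; exact absurd h (by simp)
    · rintro ⟨name, hmem, hinf⟩
      have : name.toList = [] := List.eq_nil_of_infix_nil hinf
      fin_cases hmem <;> simp_all
  | cons c rest ih =>
    simp only [pvScan, Bool.or_eq_true, ih, pvAnyNameAt, List.any_eq_true]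
    constructor
    · rintro (⟨name, hmem, hsw⟩ | ⟨name, hmem, hinf⟩)
      · exact ⟨name, hmem, ((PySem.Chars.startswith_iff _ _).mp hsw).isInfix⟩
      · exact ⟨name, hmem, hinf.trans (List.suffix_cons c rest).isInfix⟩
    · rintro ⟨name, hmem, hinf⟩
      rcases List.infix_cons_iff.mp hinf with hpre | hinf'
      · exact Or.inl ⟨name, hmem, (PySem.Chars.startswith_iff _ _).mpr hpre⟩
      · exact Or.inr ⟨name, hmem, hinf'⟩

-- ===== VERDICT (by name: the statement is the Claim_ definition above) =====
theorem is_ppfas_fund_page_py_spec : Claim_equal_is_ppfas_fund_page_py := by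
  intro text_lower _
  unfold Spec_is_ppfas_fund_page_py is_ppfas_fund_page_py is_ppfas_fund_page_py_alt
  rw [Bool.eq_iff_iff, pvScan_iff, List.any_eq_true]
  constructor
  · rintro ⟨name, hmem, hin⟩
    exact ⟨name, hmem, (PySem.Str.isIn_iff_infix _ _).mp hin⟩
  · rintro ⟨name, hmem, hinf⟩
    exact ⟨name, hmem, (PySem.Str.isIn_iff_infix _ _).mpr hinf⟩
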